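-- pv_equiv track=rewrite | github.com/os-climate/sostrades-ontology | sos_ontology/core/sos_ontology.py | get_unique_namespace_list
-- ===== SOURCE A (Python) =====
-- def get_unique_namespace_list(nonUniqueList, separator):
--     fullList = []
--     for element in nonUniqueList:
--         splitElements = element.split(separator)
--         j = len(splitElements)
--         while j > 0:
--             joinElement = separator.join([splitElements[i] for i in range(0, j)])
--             fullList.append(joinElement)
--             j -= 1
--
--     uniqueList = list(dict.fromkeys(fullList))
--     return uniqueList
-- ===== SOURCE B (Python) =====
-- def get_unique_namespace_list(nonUniqueList, separator):
--     fullList = []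
--     for element in nonUniqueList:
--         parts = element.split(separator)
--         prefixes = []
--         acc = parts[0]
--         prefixes.append(acc)
--         for part in parts[1:]:
--             acc = acc + separator + part
--             prefixes.append(acc)
--         fullList.extend(reversed(prefixes))
--     return list(dict.fromkeys(fullList))
-- ===== Notes on version B (the rewrite author's own statement) =====
-- stated objective: alternative
-- what changed: The inner while-loop that re-joins parts[:j] from scratch for every j is replaced by a single incremental pass that accumulates each prefix from the previous one by one concatenation and then appends the prefix list reversed (longest first); the final dict.fromkeys dedup is unchanged.
import Mathlib
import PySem

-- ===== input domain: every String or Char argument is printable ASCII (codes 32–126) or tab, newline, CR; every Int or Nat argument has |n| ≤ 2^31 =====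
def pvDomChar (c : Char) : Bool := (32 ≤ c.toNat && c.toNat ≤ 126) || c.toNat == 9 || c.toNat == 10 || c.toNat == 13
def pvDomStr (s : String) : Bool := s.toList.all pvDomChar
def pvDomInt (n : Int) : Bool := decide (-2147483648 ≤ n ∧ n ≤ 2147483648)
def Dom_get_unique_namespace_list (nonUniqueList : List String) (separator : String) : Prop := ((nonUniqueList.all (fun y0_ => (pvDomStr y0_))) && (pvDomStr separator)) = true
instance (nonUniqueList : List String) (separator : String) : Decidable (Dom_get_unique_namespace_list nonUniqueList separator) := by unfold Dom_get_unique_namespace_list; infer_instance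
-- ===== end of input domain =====

-- B replaces A's per-j re-join of parts[:j] by a single incremental accumulation of prefixes,
-- appended longest-first (objective: alternative decomposition). Dedup (dict.fromkeys) unchanged.

-- ===== PORT A =====
-- inner 'while j > 0' loop of A: appends separator.join(parts[:j]) for j = len .. 1
def pvInnerA (separator : String) (splitElements : List String) : Nat → List String
  | 0 => []
  | j + 1 => PySem.Str.join separator (splitElements.take (j + 1)) :: pvInnerA separator splitElements j

def get_unique_namespace_list (nonUniqueList : List String) (separator : String) : List String :=
  let fullList := nonUniqueList.foldl (fun acc element =>
    match PySem.Str.split? element separator with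
    | none => acc   -- split raises (empty separator): outside Pre_
    | some splitElements => acc ++ pvInnerA separator splitElements splitElements.length) []
  PySem.List.dedup fullList

-- ===== PORT B =====
-- B's inner loop: prefixes built by incremental concatenation, then extended reversed
def pvPrefB (separator : String) (acc : String) : List String → List String
  | [] => [acc]
  | p :: ps => acc :: pvPrefB separator (acc ++ separator ++ p) ps

def get_unique_namespace_list_alt (nonUniqueList : List String) (separator : String) : List String :=
  let fullList := nonUniqueList.foldl (fun acc element =>
    match PySem.Str.split? element separator with
    | none => acc   -- split raises (empty separator): outside Pre_
    | some [] => acc   -- unreachable: split? never returns an empty list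
    | some (p :: ps) => acc ++ (pvPrefB separator p ps).reverse) []
  PySem.List.dedup fullList

-- ===== PRECONDITION & SPEC =====
-- Pre_ excludes the empty separator with a nonempty list, where Python's str.split raises ValueError (in A and in B alike).
def Pre_get_unique_namespace_list (nonUniqueList : List String) (separator : String) : Prop :=
  separator ≠ "" ∨ nonUniqueList = []
instance (nonUniqueList : List String) (separator : String) : Decidable (Pre_get_unique_namespace_list nonUniqueList separator) := by unfold Pre_get_unique_namespace_list; infer_instance

def pvWitness_get_unique_namespace_list : List String × String := (["aa.bb.cc", "aa.bb", "x"], ".")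

def Spec_get_unique_namespace_list (nonUniqueList : List String) (separator : String) (out : List String) : Prop := out = get_unique_namespace_list_alt nonUniqueList separator
instance (nonUniqueList : List String) (separator : String) (out : List String) : Decidable (Spec_get_unique_namespace_list nonUniqueList separator out) := by unfold Spec_get_unique_namespace_list; infer_instance

-- ===== CLAIM (what is proved, stated in full; the proofs are below) =====
def Claim_equal_get_unique_namespace_list : Prop := ∀ (nonUniqueList : List String) (separator : String), Dom_get_unique_namespace_list nonUniqueList separator → Pre_get_unique_namespace_list nonUniqueList separator → Spec_get_unique_namespace_list nonUniqueList separator (get_unique_namespace_list nonUniqueList separator)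

-- ===== LEMMAS AND PROOFS =====

theorem pv_join_cons_cons (sep a b : String) (l : List String) :
    PySem.Str.join sep (a :: b :: l) = a ++ sep ++ PySem.Str.join sep (b :: l) := by
  simp [PySem.Str.join, PySem.Chars.join_cons_cons, String.append_assoc]

theorem pv_join_singleton (sep a : String) : PySem.Str.join sep [a] = a := by
  simp [PySem.Str.join]

-- join over a snoc: sep.join(a :: l + [x]) = sep.join(a :: l) + sep + x
theorem pv_join_snoc (sep : String) (l : List String) (a x : String) :
    PySem.Str.join sep ((a :: l) ++ [x]) = PySem.Str.join sep (a :: l) ++ sep ++ x := by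
  induction l generalizing a with
  | nil => simp [pv_join_cons_cons, pv_join_singleton]
  | cons b bs ih =>
    show PySem.Str.join sep (a :: b :: (bs ++ [x])) = _
    rw [pv_join_cons_cons]
    have hb := ih b
    rw [show (b :: bs) ++ [x] = b :: (bs ++ [x]) from rfl] at hb
    rw [hb, pv_join_cons_cons]
    simp [String.append_assoc]

-- B's prefixes list is the list of partial joins, shortest first
theorem pv_prefB_spec (sep : String) (rest : List String) : ∀ (a : String) (l : List String),
    pvPrefB sep (PySem.Str.join sep (a :: l)) rest
      = (List.range (rest.length + 1)).map (fun k => PySem.Str.join sep ((a :: l) ++ rest.take k)) := by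
  induction rest with
  | nil => intro a l; simp [pvPrefB]
  | cons p ps ih =>
    intro a l
    simp only [pvPrefB, List.length_cons]
    rw [← pv_join_snoc sep l a p,
        show ((a :: l) ++ [p]) = a :: (l ++ [p]) from rfl,
        ih a (l ++ [p]),
        show List.range (ps.length + 1 + 1) = 0 :: (List.range (ps.length + 1)).map Nat.succ
          from List.range_succ_eq_map,
        List.map_cons, List.map_map]
    congr 1
    · simp
    · refine List.map_congr_left ?_
      intro k _
      simp [Function.comp, List.append_assoc]

-- A's inner loop yields the partial joins, longest first
theorem pv_innerA_spec (sep : String) (parts : List String) (n : Nat) :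
    pvInnerA sep parts n = ((List.range n).map (fun k => PySem.Str.join sep (parts.take (k + 1)))).reverse := by
  induction n with
  | zero => simp [pvInnerA]
  | succ m ih => rw [List.range_succ]; simp [pvInnerA, ih]

-- per-element: A's inner loop output = B's reversed prefixes
theorem pv_inner_eq (sep : String) (a : String) (ps : List String) :
    pvInnerA sep (a :: ps) (a :: ps).length = (pvPrefB sep a ps).reverse := by
  have h1 : pvPrefB sep a ps = pvPrefB sep (PySem.Str.join sep (a :: ([] : List String))) ps := by
    rw [pv_join_singleton]
  rw [h1, pv_prefB_spec sep ps a [], pv_innerA_spec]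
  simp

-- ===== VERDICT (by name: the statement is the Claim_ definition above) =====
theorem get_unique_namespace_list_spec : Claim_equal_get_unique_namespace_list := by
  intro nonUniqueList separator _ _
  unfold Spec_get_unique_namespace_list get_unique_namespace_list get_unique_namespace_list_alt
  have hstep : (fun (acc : List String) (element : String) =>
      match PySem.Str.split? element separator with
      | none => acc
      | some splitElements => acc ++ pvInnerA separator splitElements splitElements.length)
    = (fun (acc : List String) (element : String) =>
      match PySem.Str.split? element separator with
      | none => acc
      | some [] => acc
      | some (p :: ps) => acc ++ (pvPrefB separator p ps).reverse) := by
    funext acc element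
    cases h : PySem.Str.split? element separator with
    | none => simp
    | some parts =>
      cases parts with
      | nil => simp [pvInnerA]
      | cons p ps =>
        simp only []
        rw [show (p :: ps).length = ps.length + 1 from rfl] at *
        have := pv_inner_eq separator p ps
        rw [show (p :: ps).length = ps.length + 1 from rfl] at this
        simp [this]
  simp only [hstep]
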